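-- pv_equiv track=rewrite | github.com/Acver14/forCodingTest | 2022/06/09_week/pm/짝지어제거하기.py | solution
-- ===== SOURCE A (Python) =====
-- def solution(s):
--     answer = 1
--
--     stack = []
--     for i in s:
--         if stack:
--             if stack[-1] == i:
--                 stack.pop()
--                 continue
--         stack.append(i)
--     if stack:
--         answer = 0
--     return answer
-- ===== SOURCE B (Python) =====
-- def solution(s):
--     cur = s
--     while True:
--         out = []
--         i = 0
--         n = len(cur)
--         while i < n:
--             if i + 1 < n and cur[i] == cur[i + 1]:
--                 i += 2
--             else:
--                 out.append(cur[i])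
--                 i += 1
--         nxt = ''.join(out)
--         if nxt == cur:
--             break
--         cur = nxt
--     return 1 if cur == '' else 0
-- ===== Notes on version B (the rewrite author's own statement) =====
-- stated objective: alternative
-- what changed: Replaces the single-pass stack reduction by repeated left-to-right passes that each delete adjacent equal pairs, iterated to a fixed point; correctness relies on confluence of adjacent-pair removal.
import Mathlib
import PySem

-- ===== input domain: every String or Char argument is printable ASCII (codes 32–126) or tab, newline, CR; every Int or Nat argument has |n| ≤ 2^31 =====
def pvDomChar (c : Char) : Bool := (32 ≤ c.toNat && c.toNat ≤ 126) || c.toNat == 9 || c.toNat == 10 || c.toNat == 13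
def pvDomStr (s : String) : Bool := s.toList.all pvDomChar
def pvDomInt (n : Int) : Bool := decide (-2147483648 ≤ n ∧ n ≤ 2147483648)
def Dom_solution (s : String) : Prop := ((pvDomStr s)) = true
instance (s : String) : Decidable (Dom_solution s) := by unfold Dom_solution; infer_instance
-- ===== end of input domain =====

-- B replaces A's single-pass stack reduction by repeated pair-deleting passes iterated
-- to a fixed point (alternative decomposition, relying on confluence of pair removal).


-- ===== PORT A =====
-- A's loop body: stack kept head-first (head = Python stack[-1])
def pvStep (st : List Char) (c : Char) : List Char :=
  match st with
  | top :: rest => if top = c then rest else c :: top :: rest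
  | [] => [c]

def solution (s : String) : Int :=
  let stack := s.toList.foldl pvStep []
  if stack = [] then 1 else 0

-- ===== PORT B =====
-- one left-to-right pass deleting each adjacent equal pair (Source B's inner while loop)
def pvPass : List Char → List Char
  | a :: b :: rest => if a = b then pvPass rest else a :: pvPass (b :: rest)
  | xs => xs

theorem pvPass_default (xs : List Char)
    (h : ∀ (a b : Char) (rest : List Char), xs = a :: b :: rest → False) :
    pvPass xs = xs := by
  match xs with
  | [] => rfl
  | [a] => rfl
  | a :: b :: r => exact absurd rfl (h a b r)

theorem pvPass_length_le : ∀ xs : List Char, (pvPass xs).length ≤ xs.length := by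
  intro xs
  induction xs using pvPass.induct with
  | case1 b rest ih => simp only [pvPass, if_true]; simp; omega
  | case2 a b rest h ih => simp only [pvPass, if_neg h]; simpa using ih
  | case3 xs h => rw [pvPass_default xs h]

theorem pvPass_length_lt : ∀ xs : List Char, pvPass xs ≠ xs → (pvPass xs).length < xs.length := by
  intro xs
  induction xs using pvPass.induct with
  | case1 b rest ih =>
    intro _
    simp only [pvPass, if_true]
    have := pvPass_length_le rest
    simp; omega
  | case2 a b rest h ih =>
    intro hne
    simp only [pvPass, if_neg h] at hne ⊢
    have h2 : pvPass (b :: rest) ≠ b :: rest := by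
      intro he; exact hne (by rw [he])
    have := ih h2
    simpa using this
  | case3 xs h =>
    intro hne; exact absurd (pvPass_default xs h) hne

-- the outer while-True loop of Source B: iterate pvPass to a fixed point
def pvFix (xs : List Char) : List Char :=
  let ys := pvPass xs
  if h : ys = xs then xs else pvFix ys
termination_by xs.length
decreasing_by exact pvPass_length_lt xs h

def solution_alt (s : String) : Int :=
  if pvFix s.toList = [] then 1 else 0

-- ===== PRECONDITION & SPEC =====
def Spec_solution (s : String) (out : Int) : Prop := out = solution_alt s
instance (s : String) (out : Int) : Decidable (Spec_solution s out) := by unfold Spec_solution; infer_instance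

-- ===== CLAIM (what is proved, stated in full; the proofs are below) =====
def Claim_equal_solution : Prop := ∀ (s : String), Dom_solution s → Spec_solution s (solution s)

-- ===== LEMMAS AND PROOFS =====

-- the stack of A is always irreducible (no two adjacent equal chars)
def pvIrr (xs : List Char) : Prop := List.IsChain (· ≠ ·) xs

theorem pvStep_irr (st : List Char) (c : Char) (h : pvIrr st) : pvIrr (pvStep st c) := by
  cases st with
  | nil => simp [pvStep, pvIrr]
  | cons t rest =>
    by_cases hc : t = c
    · simp only [pvStep, if_pos hc]
      exact (List.isChain_cons.mp h).2
    · simp only [pvStep, if_neg hc]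
      exact List.isChain_cons_cons.mpr ⟨fun he => hc he.symm, h⟩

-- removing an adjacent pair does not change the stack (key confluence step)
theorem pvStep_pair (st : List Char) (c : Char) (h : pvIrr st) :
    pvStep (pvStep st c) c = st := by
  cases st with
  | nil => simp [pvStep]
  | cons t rest =>
    by_cases hc : t = c
    · subst hc
      simp only [pvStep, if_pos rfl]
      cases rest with
      | nil => simp [pvStep]
      | cons r rr =>
        have hne : t ≠ r := (List.isChain_cons_cons.mp h).1
        simp only [if_true]
        rw [if_neg (show ¬ r = t from fun he => hne he.symm)]
    · simp [pvStep, hc]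

-- one pass of B does not change A's stack result, from any irreducible stack
theorem pvFoldl_pass (xs : List Char) : ∀ st : List Char, pvIrr st →
    (pvPass xs).foldl pvStep st = xs.foldl pvStep st := by
  induction xs using pvPass.induct with
  | case1 b rest ih =>
    intro st hst
    simp only [pvPass, if_true, List.foldl]
    rw [ih st hst, pvStep_pair st b hst]
  | case2 a b rest h ih =>
    intro st hst
    simp only [pvPass, if_neg h, List.foldl]
    exact ih (pvStep st a) (pvStep_irr st a hst)
  | case3 xs h =>
    intro st _
    rw [pvPass_default xs h]

-- iterating to the fixed point does not change A's stack result
theorem pvFoldl_fix_aux : ∀ (n : Nat) (xs : List Char), xs.length ≤ n →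
    (pvFix xs).foldl pvStep [] = xs.foldl pvStep [] := by
  intro n
  induction n with
  | zero =>
    intro xs hl
    have : xs = [] := List.eq_nil_of_length_eq_zero (Nat.le_zero.mp hl)
    subst this
    rw [pvFix]; simp [pvPass]
  | succ n ih =>
    intro xs hl
    rw [pvFix]
    by_cases h : pvPass xs = xs
    · simp [h]
    · simp only [h, dite_false]
      have hlt := pvPass_length_lt xs h
      rw [ih (pvPass xs) (by omega)]
      exact pvFoldl_pass xs [] (by simp [pvIrr])

theorem pvFoldl_fix (xs : List Char) : (pvFix xs).foldl pvStep [] = xs.foldl pvStep [] :=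
  pvFoldl_fix_aux xs.length xs (Nat.le_refl _)

-- a fixed point of pvPass is irreducible
theorem pvFix_point_irr : ∀ xs : List Char, pvPass xs = xs → pvIrr xs := by
  intro xs
  induction xs using pvPass.induct with
  | case1 b rest ih =>
    intro he
    exfalso
    simp only [pvPass, if_true] at he
    have h1 := pvPass_length_le rest
    have h2 : (pvPass rest).length = rest.length + 2 := by rw [he]; simp
    omega
  | case2 a b rest h ih =>
    intro he
    simp only [pvPass, if_neg h, List.cons.injEq] at he
    exact List.isChain_cons_cons.mpr ⟨h, ih he.2⟩
  | case3 xs h =>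
    intro _
    match xs, h with
    | [], _ => simp [pvIrr]
    | [a], _ => simp [pvIrr]
    | a :: b :: r, h => exact absurd rfl (h a b r)

theorem pvFix_is_fixed_aux : ∀ (n : Nat) (xs : List Char), xs.length ≤ n →
    pvPass (pvFix xs) = pvFix xs := by
  intro n
  induction n with
  | zero =>
    intro xs hl
    have : xs = [] := List.eq_nil_of_length_eq_zero (Nat.le_zero.mp hl)
    subst this
    rw [pvFix]; simp [pvPass]
  | succ n ih =>
    intro xs hl
    rw [pvFix]
    by_cases h : pvPass xs = xs
    · simpa [h] using h
    · simp only [h, dite_false]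
      have hlt := pvPass_length_lt xs h
      exact ih (pvPass xs) (by omega)

theorem pvFix_is_fixed (xs : List Char) : pvPass (pvFix xs) = pvFix xs :=
  pvFix_is_fixed_aux xs.length xs (Nat.le_refl _)

-- on an irreducible input the stack fold never pops: result is the reverse
def pvHeadsDiffer : List Char → List Char → Prop
  | t :: _, c :: _ => t ≠ c
  | _, _ => True

theorem pvFoldl_irr_rev : ∀ (ys st : List Char), pvIrr ys → pvHeadsDiffer st ys →
    ys.foldl pvStep st = ys.reverse ++ st := by
  intro ys
  induction ys with
  | nil => intro st _ _; simp
  | cons c rest ih =>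
    intro st hirr hhd
    have hstep : pvStep st c = c :: st := by
      cases st with
      | nil => rfl
      | cons t tt =>
        simp only [pvHeadsDiffer] at hhd
        simp [pvStep, hhd]
    have hrest : pvIrr rest := (List.isChain_cons.mp hirr).2
    have hhd' : pvHeadsDiffer (c :: st) rest := by
      cases rest with
      | nil => trivial
      | cons d u =>
        exact (List.isChain_cons_cons.mp hirr).1
    simp only [List.foldl, hstep]
    rw [ih (c :: st) hrest hhd']
    simp

-- emptiness of A's stack coincides with emptiness of B's fixed point
theorem pv_empty_iff (xs : List Char) : xs.foldl pvStep [] = [] ↔ pvFix xs = [] := by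
  constructor
  · intro h
    have hf := pvFoldl_fix xs
    rw [h] at hf
    have hirr := pvFix_point_irr (pvFix xs) (pvFix_is_fixed xs)
    rw [pvFoldl_irr_rev (pvFix xs) [] hirr trivial] at hf
    simpa using hf
  · intro h
    have hf := pvFoldl_fix xs
    rw [h] at hf
    simpa using hf.symm

-- ===== VERDICT (by name: the statement is the Claim_ definition above) =====
theorem solution_spec : Claim_equal_solution := by
  intro s _
  unfold Spec_solution solution solution_alt
  have hiff := pv_empty_iff s.toList
  by_cases h : s.toList.foldl pvStep [] = []
  · simp [h, hiff.mp h]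
  · have h2 : pvFix s.toList ≠ [] := fun he => h (hiff.mpr he)
    simp [h, h2]
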